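-- pv_equiv track=rewrite | github.com/seanongzh/advent-of-code | 4/pwd-count.py | has_only_two_same_digits
-- ===== SOURCE A (Python) =====
-- def has_two_same_digits(num):
--   num = str(num)
--   for i in range(0, len(num) - 1):
--     if num[i] == num[i+1]:
--       return True
--   return False
--
-- def has_only_two_same_digits(num):
--   if has_two_same_digits(num):
--     num = str(num)
--     prevEql = False
--     chk = False
--     count = 0
--     for i in range(0, len(num) - 1):
--       if num[i] == num[i+1]:
--         if prevEql:
--           if chk:
--             count -= 1
--             chk = False
--         else:
--           prevEql = True
--           chk = True
--           count += 1
--       else: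
--         prevEql = False
--     if count > 0:
--       return True
--     else:
--       return False
--   else:
--     return False
-- ===== SOURCE B (Python) =====
-- def _run_lengths(ch, n, rest):
--     if not rest:
--         return [n]
--     if rest[0] == ch:
--         return _run_lengths(ch, n + 1, rest[1:])
--     return [n] + _run_lengths(rest[0], 1, rest[1:])
--
-- def has_only_two_same_digits(num):
--     s = str(num)
--     if not s:
--         return False
--     runs = _run_lengths(s[0], 1, s[1:])
--     return any(r == 2 for r in runs)
-- ===== Notes on version B (the rewrite author's own statement) =====
-- stated objective: simpler
-- what changed: Replaces A's prevEql/chk/count state machine (plus its redundant has_two_same_digits precheck) with a run-length encoding of str(num) followed by a check that some run has length exactly 2.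
import Mathlib
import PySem

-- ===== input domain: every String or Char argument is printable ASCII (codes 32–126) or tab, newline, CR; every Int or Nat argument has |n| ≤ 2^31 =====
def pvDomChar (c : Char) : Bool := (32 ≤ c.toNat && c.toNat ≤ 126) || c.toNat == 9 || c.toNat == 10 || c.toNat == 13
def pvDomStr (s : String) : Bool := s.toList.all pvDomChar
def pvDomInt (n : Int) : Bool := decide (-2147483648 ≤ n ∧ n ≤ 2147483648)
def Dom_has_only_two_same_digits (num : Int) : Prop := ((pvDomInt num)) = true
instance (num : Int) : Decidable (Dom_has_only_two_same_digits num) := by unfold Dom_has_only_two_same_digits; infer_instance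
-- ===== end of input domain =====

-- B replaces A's prevEql/chk/count state machine (and its redundant precheck) with a
-- run-length encoding of str(num) followed by a check that some run has length exactly 2 (objective: simpler).

-- ===== PORT A =====
-- for i in range(0, len(num)-1): if num[i] == num[i+1]: return True  (early return = any over the range)
def has_two_same_digits (num : Int) : Bool :=
  let s := (PySem.Int.toStr num).toList
  (PySem.List.pyRange 0 ((s.length : Int) - 1) 1).any fun i =>
    PySem.List.pyGetD s i ' ' == PySem.List.pyGetD s (i + 1) ' '

-- one iteration of A's main loop; state (prevEql, chk, count)
def aStep (s : List Char) (st : Bool × Bool × Int) (i : Int) : Bool × Bool × Int :=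
  if PySem.List.pyGetD s i ' ' == PySem.List.pyGetD s (i + 1) ' ' then
    if st.1 then
      if st.2.1 then (st.1, false, st.2.2 - 1)
      else st
    else (true, true, st.2.2 + 1)
  else (false, st.2.1, st.2.2)

def has_only_two_same_digits (num : Int) : Bool :=
  if has_two_same_digits num then
    let s := (PySem.Int.toStr num).toList
    let st := (PySem.List.pyRange 0 ((s.length : Int) - 1) 1).foldl (aStep s) (false, false, 0)
    if st.2.2 > 0 then true else false
  else false

-- ===== PORT B =====
-- _run_lengths(ch, n, rest): run-length encoding; current run is of ch, counted n so far
def runLengths (ch : Char) (n : Int) (rest : List Char) : List Int :=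
  match rest with
  | [] => [n]
  | d :: r => if d = ch then runLengths ch (n + 1) r else n :: runLengths d 1 r

def has_only_two_same_digits_alt (num : Int) : Bool :=
  match (PySem.Int.toStr num).toList with
  | [] => false
  | c :: rest => (runLengths c 1 rest).any (· == 2)

-- ===== PRECONDITION & SPEC =====
def Spec_has_only_two_same_digits (num : Int) (out : Bool) : Prop := out = has_only_two_same_digits_alt num
instance (num : Int) (out : Bool) : Decidable (Spec_has_only_two_same_digits num out) := by unfold Spec_has_only_two_same_digits; infer_instance

-- ===== CLAIM (what is proved, stated in full; the proofs are below) =====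
def Claim_equal_has_only_two_same_digits : Prop := ∀ (num : Int), Dom_has_only_two_same_digits num → Spec_has_only_two_same_digits num (has_only_two_same_digits num)

-- ===== LEMMAS AND PROOFS =====

-- structural characterisation of the any-over-range scan
def hasTwoList : List Char → Bool
  | a :: b :: r => if a = b then true else hasTwoList (b :: r)
  | _ => false

-- structural characterisation of the foldl state machine (match on the two flags)
def listA : List Char → Bool → Bool → Int → Int
  | a :: b :: r, p, c, k =>
    if a = b then
      match p, c with
      | true, true => listA (b :: r) true false (k - 1)
      | true, false => listA (b :: r) true false k
      | false, _ => listA (b :: r) true true (k + 1)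
    else listA (b :: r) false c k
  | _, _, _, k => k

-- number of runs of length exactly 2
def c2 (l : List Int) : Int := (l.count 2 : Nat)

lemma hasTwoList_short (l : List Char) (h : l.length ≤ 1) : hasTwoList l = false := by
  match l, h with
  | [], _ => rfl
  | [a], _ => rfl

lemma any_eq (s : List Char) : ∀ (j i : Nat), s.length - i ≤ j →
    ((PySem.List.pyRange i ((s.length : Int) - 1) 1).any fun x =>
      PySem.List.pyGetD s x ' ' == PySem.List.pyGetD s (x + 1) ' ') = hasTwoList (s.drop i) := by
  intro j
  induction j with
  | zero =>
    intro i hle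
    rw [PySem.List.pyRange_one_eq_nil (by omega), hasTwoList_short]
    · rfl
    · rw [List.length_drop]; omega
  | succ j ihj =>
    intro i hle
    by_cases hlt : i < s.length - 1
    · have hi : i < s.length := by omega
      have hi1 : i + 1 < s.length := by omega
      rw [PySem.List.pyRange_one_cons (by omega), List.any_cons,
        List.drop_eq_getElem_cons hi, List.drop_eq_getElem_cons hi1]
      have hcast : ((i : Int) + 1) = ((i + 1 : Nat) : Int) := by push_cast; ring
      rw [hcast, PySem.List.pyGetD_natCast, PySem.List.pyGetD_natCast,
        List.getD_eq_getElem s ' ' hi, List.getD_eq_getElem s ' ' hi1]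
      by_cases he : s[i] = s[i + 1]
      · simp [hasTwoList, he]
      · have hne : (s[i] == s[i + 1]) = false := by simp [he]
        rw [hne, Bool.false_or, ihj (i + 1) (by omega), List.drop_eq_getElem_cons hi1]
        simp [hasTwoList, he]
    · rw [PySem.List.pyRange_one_eq_nil (by omega), hasTwoList_short]
      · rfl
      · rw [List.length_drop]; omega

lemma any_eq0 (s : List Char) :
    ((PySem.List.pyRange 0 ((s.length : Int) - 1) 1).any fun x =>
      PySem.List.pyGetD s x ' ' == PySem.List.pyGetD s (x + 1) ' ') = hasTwoList s := by
  have h := any_eq s s.length 0 (by omega)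
  simpa using h

lemma foldl_eq (s : List Char) : ∀ (j i : Nat) (p c : Bool) (k : Int), s.length - i ≤ j →
    ((PySem.List.pyRange i ((s.length : Int) - 1) 1).foldl (aStep s) (p, c, k)).2.2
      = listA (s.drop i) p c k := by
  intro j
  induction j with
  | zero =>
    intro i p c k hle
    rw [PySem.List.pyRange_one_eq_nil (by omega)]
    have hd : s.drop i = [] := List.drop_eq_nil_of_le (by omega)
    rw [hd]; rfl
  | succ j ihj =>
    intro i p c k hle
    by_cases hlt : i < s.length - 1
    · have hi : i < s.length := by omega
      have hi1 : i + 1 < s.length := by omega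
      rw [PySem.List.pyRange_one_cons (by omega), List.foldl_cons,
        List.drop_eq_getElem_cons hi, List.drop_eq_getElem_cons hi1]
      have hd1 : List.drop (i + 1) s = s[i + 1] :: s.drop (i + 2) :=
        List.drop_eq_getElem_cons hi1
      have hcast : ((i : Int) + 1) = ((i + 1 : Nat) : Int) := by push_cast; ring
      have hstep : ∀ st : Bool × Bool × Int, aStep s st (i : Int) =
          if s[i] == s[i + 1] then
            if st.1 then
              if st.2.1 then (st.1, false, st.2.2 - 1) else st
            else (true, true, st.2.2 + 1)
          else (false, st.2.1, st.2.2) := by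
        intro st
        rw [aStep, hcast, PySem.List.pyGetD_natCast, PySem.List.pyGetD_natCast,
          List.getD_eq_getElem s ' ' hi, List.getD_eq_getElem s ' ' hi1]
      by_cases he : s[i] = s[i + 1]
      · cases p
        · cases c
          · have hst : aStep s (false, false, k) ↑i = (true, true, k + 1) := by
              rw [hstep]; simp [he]
            rw [hst, hcast, ihj (i + 1) _ _ _ (by omega), hd1]
            simp [listA, he]
          · have hst : aStep s (false, true, k) ↑i = (true, true, k + 1) := by
              rw [hstep]; simp [he]
            rw [hst, hcast, ihj (i + 1) _ _ _ (by omega), hd1]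
            simp [listA, he]
        · cases c
          · have hst : aStep s (true, false, k) ↑i = (true, false, k) := by
              rw [hstep]; simp [he]
            rw [hst, hcast, ihj (i + 1) _ _ _ (by omega), hd1]
            simp [listA, he]
          · have hst : aStep s (true, true, k) ↑i = (true, false, k - 1) := by
              rw [hstep]; simp [he]
            rw [hst, hcast, ihj (i + 1) _ _ _ (by omega), hd1]
            simp [listA, he]
      · have hst : aStep s (p, c, k) ↑i = (false, c, k) := by
          rw [hstep]; simp [he]
        rw [hst, hcast, ihj (i + 1) _ _ _ (by omega), hd1]
        simp [listA, he]
    · rw [PySem.List.pyRange_one_eq_nil (by omega)]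
      rcases hd : s.drop i with _ | ⟨x, _ | ⟨y, r⟩⟩
      · rfl
      · rfl
      · exfalso
        have := congrArg List.length hd
        simp [List.length_drop] at this
        omega

lemma foldl_eq0 (s : List Char) :
    ((PySem.List.pyRange 0 ((s.length : Int) - 1) 1).foldl (aStep s) (false, false, 0)).2.2
      = listA s false false 0 := by
  have h := foldl_eq s s.length 0 false false 0 (by omega)
  simpa using h

lemma c2_cons (a : Int) (l : List Int) :
    c2 (a :: l) = (if a = 2 then 1 else 0) + c2 l := by
  by_cases h : a = 2 <;> simp [c2, h] <;> omega

lemma listA_runs (rest : List Char) : ∀ (a : Char) (k : Int),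
    (∀ c, listA (a :: rest) false c k = k + c2 (runLengths a 1 rest))
    ∧ (listA (a :: rest) true true k = (k - 1) + c2 (runLengths a 2 rest))
    ∧ (∀ n : Int, 3 ≤ n → listA (a :: rest) true false k = k + c2 (runLengths a n rest)) := by
  induction rest with
  | nil =>
    intro a k
    refine ⟨fun c => ?_, ?_, fun n hn => ?_⟩
    · simp [listA, runLengths, c2]
    · simp [listA, runLengths, c2]
    · have hn2 : ¬ (n = 2) := by omega
      simp [listA, runLengths, c2, hn2]
  | cons b r ih =>
    intro a k
    by_cases hab : b = a
    · subst hab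
      refine ⟨fun c => ?_, ?_, fun n hn => ?_⟩
      · show listA (b :: b :: r) false c k = k + c2 (runLengths b 1 (b :: r))
        rw [show listA (b :: b :: r) false c k = listA (b :: r) true true (k + 1) by simp [listA],
          (ih b (k + 1)).2.1, show runLengths b 1 (b :: r) = runLengths b 2 r by simp [runLengths]]
        ring
      · rw [show listA (b :: b :: r) true true k = listA (b :: r) true false (k - 1) by simp [listA],
          (ih b (k - 1)).2.2 3 (by norm_num),
          show runLengths b 2 (b :: r) = runLengths b 3 r by simp [runLengths]]
      · rw [show listA (b :: b :: r) true false k = listA (b :: r) true false k by simp [listA],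
          (ih b k).2.2 (n + 1) (by omega),
          show runLengths b n (b :: r) = runLengths b (n + 1) r by simp [runLengths]]
    · have hne : ¬ (a = b) := fun h => hab h.symm
      refine ⟨fun c => ?_, ?_, fun n hn => ?_⟩
      · rw [show listA (a :: b :: r) false c k = listA (b :: r) false c k by simp [listA, hne],
          (ih b k).1 c,
          show runLengths a 1 (b :: r) = 1 :: runLengths b 1 r by simp [runLengths, hab], c2_cons]
        norm_num
      · rw [show listA (a :: b :: r) true true k = listA (b :: r) false true k by simp [listA, hne],
          (ih b k).1 true,
          show runLengths a 2 (b :: r) = 2 :: runLengths b 1 r by simp [runLengths, hab], c2_cons]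
        norm_num
        ring
      · rw [show listA (a :: b :: r) true false k = listA (b :: r) false false k by simp [listA, hne],
          (ih b k).1 false,
          show runLengths a n (b :: r) = n :: runLengths b 1 r by simp [runLengths, hab], c2_cons]
        have hn2 : ¬ (n = 2) := by omega
        simp [hn2]

lemma noadj_runs (rest : List Char) : ∀ (a : Char),
    hasTwoList (a :: rest) = false →
    ∀ n : Int, c2 (runLengths a n rest) = if n = 2 then 1 else 0 := by
  induction rest with
  | nil =>
    intro a _ n
    rw [show runLengths a n [] = [n] from rfl, c2_cons]
    simp [c2]
  | cons b r ih =>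
    intro a h n
    have hne : ¬ (a = b) := by
      intro hh; simp [hasTwoList, hh] at h
    have hba : ¬ (b = a) := fun hh => hne (Eq.symm hh)
    have hr : hasTwoList (b :: r) = false := by
      simpa [hasTwoList, hne] using h
    rw [show runLengths a n (b :: r) = n :: runLengths b 1 r by simp [runLengths, hba],
      c2_cons, ih b hr 1]
    simp

lemma c2_pos_iff_any (l : List Int) : (0 < c2 l) ↔ l.any (· == 2) = true := by
  unfold c2
  rw [Int.natCast_pos, List.count_pos_iff, List.any_eq_true]
  constructor
  · intro h; exact ⟨2, h, by simp⟩
  · rintro ⟨x, hx, hb⟩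
    have hx2 : x = 2 := by simpa using hb
    rw [hx2] at hx; exact hx

-- ===== VERDICT (by name: the statement is the Claim_ definition above) =====
theorem has_only_two_same_digits_spec : Claim_equal_has_only_two_same_digits := by
  intro num _
  unfold Spec_has_only_two_same_digits
  simp only [has_only_two_same_digits, has_two_same_digits, has_only_two_same_digits_alt]
  rw [any_eq0, foldl_eq0]
  cases hs : (PySem.Int.toStr num).toList with
  | nil => simp [hasTwoList]
  | cons a rest =>
    have hlist : listA (a :: rest) false false 0 = c2 (runLengths a 1 rest) := by
      rw [(listA_runs rest a 0).1 false]; ring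
    by_cases ht : hasTwoList (a :: rest) = true
    · rw [if_pos ht, hlist]
      cases hany : (runLengths a 1 rest).any (· == 2) with
      | false =>
        have hnp : ¬ (0 : Int) < c2 (runLengths a 1 rest) := by
          intro hpos
          have h2 := (c2_pos_iff_any _).1 hpos
          rw [h2] at hany
          exact Bool.noConfusion hany
        rw [if_neg hnp]
        exact hany.symm
      | true =>
        rw [if_pos ((c2_pos_iff_any _).2 hany)]
        exact hany.symm
    · rw [if_neg ht]
      have h0 : c2 (runLengths a 1 rest) = 0 := by
        rw [noadj_runs rest a (by simpa using ht) 1]; norm_num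
      have hany : (runLengths a 1 rest).any (· == 2) = false := by
        cases hv : (runLengths a 1 rest).any (· == 2) with
        | false => rfl
        | true =>
          exfalso
          have := (c2_pos_iff_any _).2 hv
          omega
      exact hany.symm
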